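-- pv_equiv track=rewrite | github.com/Douile/pydns | server.py | bitunpack
-- ===== SOURCE A (Python) =====
-- def bitunpack(byte,struct_s):
--     a = 0
--     output = []
--     negator = 0
--     pos = 0
--     for c in struct_s:
--         a += int(c)
--     for b in range(0,len(struct_s)):
--         length = int(struct_s[b])
--         i = a-pos
--         x = byte ^ negator
--         y = x>>i
--         output.append(y)
--         negator = negator ^ (y<<i)
--         pos += length
--     return tuple(output)
-- ===== SOURCE B (Python) =====
-- def bitunpack(byte, struct_s):
--     # Positional re-implementation: each field is read off byte independently
--     # from precomputed shift positions; no running negator/XOR state.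
--     widths = [int(c) for c in struct_s]
--     if not widths:
--         return ()
--     shift = sum(widths)
--     output = [byte >> shift]
--     for prev in widths[:-1]:
--         shift -= prev
--         output.append((byte >> shift) & ((1 << prev) - 1))
--     return tuple(output)
-- ===== Notes on version B (the rewrite author's own statement) =====
-- stated objective: alternative
-- what changed: Replaces A's stateful XOR-accumulator (negator) loop, which progressively clears already-extracted high bits of byte, by a stateless shift-and-mask scheme: field 0 is byte >> total and every later field is read directly from byte at its precomputed bit position with a mask of the previous field's width.
import Mathlib
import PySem

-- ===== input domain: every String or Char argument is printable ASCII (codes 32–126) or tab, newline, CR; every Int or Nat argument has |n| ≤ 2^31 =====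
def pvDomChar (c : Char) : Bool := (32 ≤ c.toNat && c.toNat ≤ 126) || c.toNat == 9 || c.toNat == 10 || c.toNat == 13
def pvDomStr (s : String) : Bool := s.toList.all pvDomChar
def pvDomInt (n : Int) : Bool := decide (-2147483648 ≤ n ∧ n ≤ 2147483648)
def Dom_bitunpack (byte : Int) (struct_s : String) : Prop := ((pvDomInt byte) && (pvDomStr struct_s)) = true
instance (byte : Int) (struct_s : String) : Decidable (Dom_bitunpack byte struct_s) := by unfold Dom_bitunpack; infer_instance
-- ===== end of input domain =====

-- B replaces A's running XOR-accumulator with independent shift-and-mask reads at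
-- precomputed bit positions; equal wherever A returns (Pre_: every character a digit).

-- int(c) for a single character c; the getD 0 default is never reached under Pre_
def pvDigit (c : Char) : Int := (PySem.Int.ofChars? [c]).getD 0

-- ===== PORT A =====
def bitunpack (byte : Int) (struct_s : String) : List Int :=
  let cs := struct_s.toList
  let a := cs.foldl (fun acc c => acc + pvDigit c) 0
  let st := (PySem.List.pyRange 0 (PySem.Str.len struct_s)).foldl
    (fun (st : List Int × Int × Int) b =>
      let length := pvDigit (PySem.List.pyGetD cs b '0')   -- int(struct_s[b]); b always in range
      let i := a - st.2.2
      let x := PySem.Int.bxor byte st.2.1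
      let y := x >>> i.toNat                                -- Python raises on i < 0; Pre_ gives i ≥ 0
      (st.1 ++ [y], PySem.Int.bxor st.2.1 (y <<< i.toNat), st.2.2 + length))
    ([], 0, 0)
  st.1

-- ===== PORT B =====
def bitunpack_alt (byte : Int) (struct_s : String) : List Int :=
  let widths := struct_s.toList.map pvDigit
  if widths.isEmpty then []
  else
    let shift := widths.foldl (· + ·) 0
    let st := widths.dropLast.foldl
      (fun (st : List Int × Int) prev =>
        (st.1 ++ [PySem.Int.band (byte >>> (st.2 - prev).toNat) (((1:Int) <<< prev.toNat) - 1)],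
         st.2 - prev))
      ([byte >>> shift.toNat], shift)
    st.1

-- ===== PRECONDITION & SPEC =====
-- Pre_ excludes exactly the inputs where A raises ValueError: int(c) on a non-digit character.
def Pre_bitunpack (byte : Int) (struct_s : String) : Prop :=
  struct_s.toList.all PySem.Chars.isdigit = true
instance (byte : Int) (struct_s : String) : Decidable (Pre_bitunpack byte struct_s) := by
  unfold Pre_bitunpack; infer_instance
def pvWitness_bitunpack : Int × String := (173, "3212")

def Spec_bitunpack (byte : Int) (struct_s : String) (out : List Int) : Prop := out = bitunpack_alt byte struct_s
instance (byte : Int) (struct_s : String) (out : List Int) : Decidable (Spec_bitunpack byte struct_s out) := by unfold Spec_bitunpack; infer_instance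

-- ===== CLAIM (what is proved, stated in full; the proofs are below) =====
def Claim_equal_bitunpack : Prop := ∀ (byte : Int) (struct_s : String), Dom_bitunpack byte struct_s → Pre_bitunpack byte struct_s → Spec_bitunpack byte struct_s (bitunpack byte struct_s)

-- ===== LEMMAS AND PROOFS =====

-- ---- Nat bit lemmas ----
lemma nat_xor_disjoint (j a b : ℕ) (ha : a % 2^j = 0) (hb : b < 2^j) : a ^^^ b = a + b := by
  obtain ⟨q, hq⟩ : 2^j ∣ a := Nat.dvd_of_mod_eq_zero ha
  subst hq
  apply Nat.eq_of_testBit_eq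
  intro i
  rw [Nat.testBit_xor, Nat.testBit_two_pow_mul_add q hb, Nat.mul_comm, Nat.testBit_mul_two_pow]
  by_cases h : i < j
  · simp [h, Nat.not_le.mpr h]
  · have : b < 2^i := lt_of_lt_of_le hb (Nat.pow_le_pow_right (by norm_num) (Nat.le_of_not_lt h))
    simp [h, Nat.le_of_not_lt h, Nat.testBit_lt_two_pow this]

-- bitwise complement inside a j-bit block
lemma xor_two_pow_sub_one (j v : ℕ) (h : v < 2^j) : (2^j - 1) ^^^ v = 2^j - 1 - v := by
  have e : (~~~(⟨v, h⟩ : BitVec j)) = BitVec.allOnes j ^^^ ⟨v, h⟩ := by ext i hi; simp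
  have h1 := @BitVec.toNat_not j ⟨v, h⟩
  rw [e, BitVec.toNat_xor] at h1
  have h2 : (BitVec.allOnes j).toNat = 2^j - 1 := by simp
  rw [h2] at h1; exact h1

lemma nat_xor_sub (j a b : ℕ) (ha : a % 2^j = 2^j - 1) (hb : b < 2^j) : a ^^^ b = a - b := by
  have hd := Nat.div_add_mod a (2^j)
  set q := a / 2^j with hq
  have hae : a = 2^j * q + (2^j - 1) := by omega
  have hble : b ≤ 2^j - 1 := by omega
  have hsub : a - b = 2^j * q + (2^j - 1 - b) := by omega
  apply Nat.eq_of_testBit_eq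
  intro i
  rw [Nat.testBit_xor, hsub, hae,
      Nat.testBit_two_pow_mul_add q (by omega),
      Nat.testBit_two_pow_mul_add q (by omega)]
  by_cases h : i < j
  · rw [if_pos h, if_pos h, ← xor_two_pow_sub_one j b hb, Nat.testBit_xor]
  · have : b < 2^i := lt_of_lt_of_le hb (Nat.pow_le_pow_right (by norm_num) (Nat.le_of_not_lt h))
    simp [h, Nat.testBit_lt_two_pow this]

lemma nat_xor_disjoint_cancel (j a b : ℕ) (ha : a % 2^j = 0) (hb : b < 2^j) : (a + b) ^^^ a = b := by
  rw [← nat_xor_disjoint j a b ha hb, Nat.xor_comm a b, Nat.xor_assoc, Nat.xor_self, Nat.xor_zero]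

lemma nat_xor_sub_cancel (j a b : ℕ) (ha : a % 2^j = 2^j - 1) (hb : b < 2^j) : (a - b) ^^^ a = b := by
  rw [← nat_xor_sub j a b ha hb, Nat.xor_comm a b, Nat.xor_assoc, Nat.xor_self, Nat.xor_zero]

-- ---- Int bxor/band lemmas ----
lemma cast_two_pow (j : ℕ) : ((2^j : ℕ) : ℤ) = 2^j := by push_cast; ring

lemma toNat_two_pow_mul {u t : ℤ} (j : ℕ) (ht : u = 2^j * t) (h0 : 0 ≤ u) :
    u.toNat = 2^j * t.toNat := by
  have hp : (0:ℤ) < 2^j := by positivity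
  have ht0 : 0 ≤ t := by nlinarith
  have hprod : ((2^j * t.toNat : ℕ) : ℤ) = 2^j * t := by push_cast [Int.toNat_of_nonneg ht0]; ring
  omega

-- the two's-complement image -u-1 of a negative multiple of 2^j has all-ones low bits
lemma negpart (j : ℕ) {u t : ℤ} (ht : u = 2^j * t) (h0 : ¬ 0 ≤ u) :
    (-u - 1).toNat % 2^j = 2^j - 1 ∧ ((-u - 1).toNat : ℤ) = -u - 1 := by
  have hp : (0:ℤ) < 2^j := by positivity
  have ht0 : t ≤ -1 := by nlinarith
  have htn : 0 ≤ -t - 1 := by omega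
  have hge : 0 ≤ -u - 1 := by nlinarith
  have h1 : 1 ≤ (2:ℕ)^j := Nat.one_le_two_pow
  have hpj := cast_two_pow j
  have hprod : ((2^j * (-t-1).toNat : ℕ) : ℤ) = 2^j * (-t-1) := by
    push_cast [Int.toNat_of_nonneg htn]; ring
  have hm : -u - 1 = 2 ^ j * (-t - 1) + (2 ^ j - 1) := by rw [ht]; ring
  have he : (-u - 1).toNat = 2^j * (-t-1).toNat + (2^j - 1) := by omega
  refine ⟨?_, by omega⟩
  rw [he, Nat.mul_add_mod]
  exact Nat.mod_eq_of_lt (by omega)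

-- XOR of a multiple of 2^j with a j-bit value is addition (both signs of u)
lemma bxor_disjoint (j : ℕ) (u v : ℤ) (hu : u % 2^j = 0) (hv0 : 0 ≤ v) (hv : v < 2^j) :
    PySem.Int.bxor u v = u + v := by
  obtain ⟨t, ht⟩ : (2^j : ℤ) ∣ u := Int.dvd_of_emod_eq_zero hu
  have hpj := cast_two_pow j
  have h1 : 1 ≤ (2:ℕ)^j := Nat.one_le_two_pow
  have hvn : v.toNat < 2^j := by omega
  have hvv : (v.toNat : ℤ) = v := Int.toNat_of_nonneg hv0
  by_cases h0 : 0 ≤ u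
  · simp only [PySem.Int.bxor, if_pos h0, if_pos hv0]
    have h1' : u.toNat % 2^j = 0 := by rw [toNat_two_pow_mul j ht h0]; simp
    rw [nat_xor_disjoint j _ _ h1' hvn]
    have := Int.toNat_of_nonneg h0
    omega
  · simp only [PySem.Int.bxor, if_neg h0, if_pos hv0]
    obtain ⟨hmod, hcast⟩ := negpart j ht h0
    have hml := Nat.mod_le (-u - 1).toNat (2^j)
    rw [nat_xor_sub j _ _ hmod hvn]
    omega

-- and the cancelling form (u+v) ^ u = v
lemma bxor_cancel (j : ℕ) (u v : ℤ) (hu : u % 2^j = 0) (hv0 : 0 ≤ v) (hv : v < 2^j) :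
    PySem.Int.bxor (u + v) u = v := by
  obtain ⟨t, ht⟩ : (2^j : ℤ) ∣ u := Int.dvd_of_emod_eq_zero hu
  have hp : (0:ℤ) < 2^j := by positivity
  have hpj := cast_two_pow j
  have h1 : 1 ≤ (2:ℕ)^j := Nat.one_le_two_pow
  have hvn : v.toNat < 2^j := by omega
  have hvv : (v.toNat : ℤ) = v := Int.toNat_of_nonneg hv0
  by_cases h0 : 0 ≤ u
  · have h0' : 0 ≤ u + v := by omega
    simp only [PySem.Int.bxor, if_pos h0', if_pos h0]
    have h1' : u.toNat % 2^j = 0 := by rw [toNat_two_pow_mul j ht h0]; simp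
    have hsum : (u + v).toNat = u.toNat + v.toNat := by omega
    rw [hsum, nat_xor_disjoint_cancel j _ _ h1' hvn]
    omega
  · have ht0 : t ≤ -1 := by nlinarith
    have h0' : ¬ 0 ≤ u + v := by nlinarith
    simp only [PySem.Int.bxor, if_neg h0', if_neg h0]
    obtain ⟨hmod, hcast⟩ := negpart j ht h0
    have hml := Nat.mod_le (-u - 1).toNat (2^j)
    have he : (-(u + v) - 1).toNat = (-u - 1).toNat - v.toNat := by omega
    rw [he, nat_xor_sub_cancel j _ _ hmod hvn]
    omega

lemma shr_shl (b : ℤ) (k : ℕ) : (b >>> k) <<< k = b - b % 2^k := by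
  rw [Int.shiftRight_eq_div_pow, Int.shiftLeft_eq]
  have h := Int.ediv_add_emod b ((2:ℤ)^k)
  have hpj := cast_two_pow k
  rw [hpj]
  linarith [mul_comm (b / (2:ℤ)^k) ((2:ℤ)^k)]

-- x = byte ^ negator recovers the untouched low bits
lemma bxor_clear (b : ℤ) (k : ℕ) : PySem.Int.bxor b (b - b % 2^k) = b % 2^k := by
  have hp : (0:ℤ) < 2^k := by positivity
  have h1 : (b - b % 2^k) % 2^k = 0 := by
    have he : b - b % 2^k = 2^k * (b / 2^k) := by rw [Int.emod_def]; ring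
    rw [he, Int.mul_emod_right]
  have h2 := Int.emod_nonneg b (by positivity : (2:ℤ)^k ≠ 0)
  have h3 := Int.emod_lt_of_pos b hp
  have := bxor_cancel k (b - b % 2^k) (b % 2^k) h1 h2 h3
  rwa [sub_add_cancel] at this

-- the negator update accumulates to the next clearing mask
lemma bxor_merge (b : ℤ) (i j : ℕ) (hij : i ≤ j) :
    PySem.Int.bxor (b - b % 2^j) (((b % 2^j) >>> i) <<< i) = b - b % 2^i := by
  have hpj : (0:ℤ) < 2^j := by positivity
  have hpi : (0:ℤ) < 2^i := by positivity
  have hdvd : ((2:ℤ)^i) ∣ ((2:ℤ)^j) := pow_dvd_pow 2 hij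
  have hmm : b % 2^j % 2^i = b % 2^i := Int.emod_emod_of_dvd b hdvd
  rw [shr_shl, hmm]
  have h1 : (b - b % 2^j) % 2^j = 0 := by
    have he : b - b % 2^j = 2^j * (b / 2^j) := by rw [Int.emod_def]; ring
    rw [he, Int.mul_emod_right]
  have h2j := Int.emod_nonneg b (by positivity : (2:ℤ)^j ≠ 0)
  have h2i := Int.emod_nonneg b (by positivity : (2:ℤ)^i ≠ 0)
  have h3j := Int.emod_lt_of_pos b hpj
  have hle : b % 2^i ≤ b % 2^j := by
    rw [← hmm]
    have := Int.emod_nonneg (b % 2^j) (by positivity : (2:ℤ)^i ≠ 0)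
    have h4 := Int.ediv_add_emod (b % 2^j) ((2:ℤ)^i)
    have h5 : 0 ≤ (b % 2^j) / 2^i := Int.ediv_nonneg h2j (le_of_lt hpi)
    nlinarith
  have := bxor_disjoint j (b - b % 2^j) (b % 2^j - b % 2^i) h1 (by omega) (by omega)
  rw [this]; ring

-- masking with (1 << p) - 1 is emod (both signs of x)
lemma band_mask (x : ℤ) (p : ℕ) : PySem.Int.band x (((1:ℤ) <<< p) - 1) = x % 2^p := by
  have hpj := cast_two_pow p
  have h1 : 1 ≤ (2:ℕ)^p := Nat.one_le_two_pow
  have hm : ((1:ℤ) <<< p) - 1 = ((2^p - 1 : ℕ) : ℤ) := by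
    rw [Int.shiftLeft_eq]; push_cast [h1]; ring
  have hm0 : (0:ℤ) ≤ ((2^p - 1 : ℕ) : ℤ) := by positivity
  rw [hm]
  by_cases h0 : 0 ≤ x
  · simp only [PySem.Int.band, if_pos h0, if_pos hm0]
    rw [Int.toNat_natCast, Nat.and_two_pow_sub_one_eq_mod]
    have hx := Int.toNat_of_nonneg h0
    have hc : ((x.toNat % 2^p : ℕ) : ℤ) = x % 2^p := by
      rw [Int.natCast_mod]; push_cast; rw [hx]
    exact hc
  · simp only [PySem.Int.band, if_neg h0, if_pos hm0]
    rw [Int.toNat_natCast, Nat.and_comm, Nat.and_two_pow_sub_one_eq_mod]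
    set k := (-x - 1).toNat with hk
    have hkc : (k : ℤ) = -x - 1 := Int.toNat_of_nonneg (by omega)
    have hdm := Nat.div_add_mod k (2^p)
    set r := k % 2^p with hr
    have hrlt : r < 2^p := Nat.mod_lt _ (by omega)
    have hcast : (2:ℤ)^p * ((k:ℤ) / 2^p) + (r:ℤ) = (k:ℤ) := by
      have : ((2^p * (k / 2^p) + r : ℕ) : ℤ) = (k:ℤ) := by exact_mod_cast hdm
      push_cast at this; linarith
    have hxe : x = (2^p - 1 - (r:ℤ)) + 2^p * (-((k:ℤ) / 2^p + 1)) := by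
      linarith
    have : x % 2^p = 2^p - 1 - (r:ℤ) := by
      rw [hxe, Int.add_mul_emod_self_left]
      apply Int.emod_eq_of_lt <;> omega
    omega

-- the value A emits equals B's independent shift-and-mask read
lemma emit_eq (b : ℤ) (i p : ℕ) :
    (b % 2^(i + p)) >>> i = PySem.Int.band (b >>> i) (((1:ℤ) <<< p) - 1) := by
  rw [band_mask, Int.shiftRight_eq_div_pow, Int.shiftRight_eq_div_pow]
  push_cast
  have hpi : (0:ℤ) < 2^i := by positivity
  have hpp : (0:ℤ) < 2^p := by positivity
  have hq : b % 2^(i+p) = b - 2^(i+p) * (b / 2^(i+p)) := Int.emod_def b _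
  have hsplit : (2:ℤ)^(i+p) = 2^i * 2^p := pow_add 2 i p
  have h2 : (b - 2^(i+p) * (b / 2^(i+p))) = b + (-(2^p * (b / 2^(i+p)))) * 2^i := by
    rw [hsplit]; ring
  rw [hq, h2, Int.add_mul_ediv_right _ _ (by positivity : (2:ℤ)^i ≠ 0)]
  have hdd : b / 2^(i+p) = b / 2^i / 2^p := by
    rw [hsplit, Int.ediv_ediv_eq_ediv_mul]; positivity
  have hmd : (b / 2^i) % 2^p = b / 2^i - 2^p * (b / 2^i / 2^p) := Int.emod_def _ _
  rw [hdd, hmd]; ring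

-- ---- digits ----
lemma pvDigit_nonneg (c : Char) (h : PySem.Chars.isdigit c = true) : 0 ≤ pvDigit c := by
  simp only [PySem.Chars.isdigit, Bool.and_eq_true, decide_eq_true_eq] at h
  obtain ⟨h1, h2⟩ := h
  have hl : 48 ≤ c.toNat := h1
  have hr : c.toNat ≤ 57 := h2
  have : c = '0' ∨ c = '1' ∨ c = '2' ∨ c = '3' ∨ c = '4' ∨ c = '5' ∨ c = '6' ∨ c = '7' ∨ c = '8' ∨ c = '9' := by
    have he : c = Char.ofNat c.toNat := by rw [Char.ofNat_toNat]
    interval_cases hn : c.toNat <;> simp_all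
  rcases this with h|h|h|h|h|h|h|h|h|h <;> subst h <;> decide

-- ---- the two loop bodies, named ----
def stepA (byte a : Int) (st : List Int × Int × Int) (w : Int) : List Int × Int × Int :=
  let i := a - st.2.2
  let y := (PySem.Int.bxor byte st.2.1) >>> i.toNat
  (st.1 ++ [y], PySem.Int.bxor st.2.1 (y <<< i.toNat), st.2.2 + w)

def stepB (byte : Int) (st : List Int × Int) (prev : Int) : List Int × Int :=
  (st.1 ++ [PySem.Int.band (byte >>> (st.2 - prev).toNat) (((1:Int) <<< prev.toNat) - 1)], st.2 - prev)

-- the tail of A's loop (negator invariant) tracks B's loop shifted by one element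
lemma loop_eq (byte a : Int) (l : List Int) : ∀ (p pos : Int) (out : List Int) (neg : Int),
    0 ≤ p → (∀ w ∈ l, 0 ≤ w) → 0 ≤ pos → l.sum ≤ a - pos →
    neg = byte - byte % 2^((a - pos + p).toNat) →
    (List.foldl (stepA byte a) (out, neg, pos) l).1 =
    (List.foldl (stepB byte) (out, a - pos + p) ((p :: l).dropLast)).1 := by
  induction l with
  | nil => intro p pos out neg _ _ _ _ _; simp [List.dropLast]
  | cons w tail ih =>
    intro p pos out neg hp hl hpos hsum hneg
    have hw : 0 ≤ w := hl w (by simp)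
    have htail : ∀ x ∈ tail, 0 ≤ x := fun x hx => hl x (by simp [hx])
    have hts : 0 ≤ tail.sum := List.sum_nonneg htail
    have hsum' : w + tail.sum = (w :: tail).sum := by simp
    have hi0 : 0 ≤ a - pos := by omega
    have hsplit : (a - pos + p).toNat = (a - pos).toNat + p.toNat := by omega
    have hx : PySem.Int.bxor byte neg = byte % 2^((a - pos + p).toNat) := by
      rw [hneg, bxor_clear]
    have hy : (PySem.Int.bxor byte neg) >>> (a - pos).toNat
        = PySem.Int.band (byte >>> (a - pos).toNat) (((1:ℤ) <<< p.toNat) - 1) := by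
      rw [hx, hsplit, emit_eq]
    have hneg' : PySem.Int.bxor neg
          (((PySem.Int.bxor byte neg) >>> (a - pos).toNat) <<< (a - pos).toNat)
        = byte - byte % 2^((a - pos).toNat) := by
      rw [hx, hneg, bxor_merge byte ((a-pos).toNat) ((a-pos+p).toNat) (by omega)]
    have hdl : (p :: w :: tail).dropLast = p :: (w :: tail).dropLast := rfl
    rw [hdl]
    simp only [List.foldl_cons]
    have hstepB : stepB byte (out, a - pos + p) p
        = (out ++ [PySem.Int.band (byte >>> (a - pos).toNat) (((1:ℤ) <<< p.toNat) - 1)], a - pos) := by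
      simp only [stepB, show a - pos + p - p = a - pos by ring]
    have hstepA : stepA byte a (out, neg, pos) w
        = (out ++ [PySem.Int.band (byte >>> (a - pos).toNat) (((1:ℤ) <<< p.toNat) - 1)],
           byte - byte % 2^((a - pos).toNat), pos + w) := by
      simp only [stepA]
      rw [hneg', hy]
    rw [hstepA, hstepB]
    have := ih w (pos + w) (out ++ [PySem.Int.band (byte >>> (a - pos).toNat) (((1:ℤ) <<< p.toNat) - 1)])
      (byte - byte % 2^((a - pos).toNat)) hw htail (by omega) (by simp at hsum ⊢; omega)
      (by rw [show a - (pos + w) + w = a - pos by ring])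
    rw [this, show a - (pos + w) + w = a - pos by ring]

-- foldl (+) is sum
lemma foldl_add_sum (l : List Int) : ∀ x : Int, l.foldl (· + ·) x = x + l.sum := by
  induction l with
  | nil => simp
  | cons w tail ih => intro x; simp [ih, add_assoc]

-- ===== VERDICT (by name: the statement is the Claim_ definition above) =====
theorem bitunpack_spec : Claim_equal_bitunpack := by
  intro byte struct_s _hdom hpre
  unfold Spec_bitunpack
  set cs := struct_s.toList with hcs
  set ws := cs.map pvDigit with hws
  set A0 := cs.foldl (fun acc c => acc + pvDigit c) 0 with hA0
  have hlen : PySem.Str.len struct_s = PySem.List.len cs := by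
    simp [PySem.Str.len_eq, PySem.List.len_eq, hcs]
  -- reduce A to a foldl of stepA over ws
  have hA : bitunpack byte struct_s = (List.foldl (stepA byte A0) ([], 0, 0) ws).1 := by
    have hfold := PySem.List.foldl_pyRange_pyGetD (xs := cs) (d := '0')
      (f := fun st c => stepA byte A0 st (pvDigit c)) (init := (([], 0, 0) : List Int × Int × Int))
      (a := 0) le_rfl
    calc bitunpack byte struct_s
        = (List.foldl (fun (st : List Int × Int × Int) b =>
              (fun st c => stepA byte A0 st (pvDigit c)) st (PySem.List.pyGetD cs b '0'))
            ([], 0, 0) (PySem.List.pyRange 0 (PySem.List.len cs))).1 := by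
          simp only [bitunpack]; rw [hlen]; rfl
      _ = (List.foldl (fun st c => stepA byte A0 st (pvDigit c)) ([], 0, 0) cs).1 := by
          rw [hfold]; simp
      _ = (List.foldl (stepA byte A0) ([], 0, 0) ws).1 := by
          rw [hws, List.foldl_map]
  -- element facts
  have hnn : ∀ w ∈ ws, 0 ≤ w := by
    intro w hw
    rw [hws] at hw
    obtain ⟨c, hc, rfl⟩ := List.mem_map.mp hw
    exact pvDigit_nonneg c (by
      have := List.all_eq_true.mp hpre
      exact this c hc)
  have hsum : A0 = ws.sum := by
    rw [hA0, hws, ← List.foldl_map, foldl_add_sum]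
    simp
  rw [hA]
  -- unfold B
  match hwe : ws with
  | [] =>
      simp only [bitunpack_alt, ← hcs, ← hws]
      simp
  | w0 :: rest =>
      have hw0 : 0 ≤ w0 := hnn w0 (by simp)
      have hrest : ∀ w ∈ rest, 0 ≤ w := fun w hw => hnn w (by simp [hw])
      have hsum' : A0 = w0 + rest.sum := by rw [hsum]; simp
      have hA00 : 0 ≤ A0 := by
        have := List.sum_nonneg hrest; omega
      -- B's value
      have hB : bitunpack_alt byte struct_s
          = (List.foldl (stepB byte) ([byte >>> A0.toNat], A0) ((w0 :: rest).dropLast)).1 := by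
        simp only [bitunpack_alt, ← hcs, ← hws]
        have hne : ((w0 :: rest).isEmpty) = false := rfl
        rw [hne]
        simp only [Bool.false_eq_true, if_false]
        have hsh : (w0 :: rest).foldl (· + ·) 0 = A0 := by
          rw [foldl_add_sum, hsum]; simp
        rw [hsh]
        rfl
      rw [hB]
      -- A's first step
      have hfirst : stepA byte A0 ([], 0, 0) w0
          = ([byte >>> A0.toNat], byte - byte % 2^(A0.toNat), w0) := by
        simp only [stepA]
        rw [PySem.Int.bxor_zero, PySem.Int.bxor_comm, PySem.Int.bxor_zero]
        simp [shr_shl]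
      rw [List.foldl_cons, hfirst]
      have := loop_eq byte A0 rest w0 w0 [byte >>> A0.toNat] (byte - byte % 2^(A0.toNat))
        hw0 hrest hw0 (by omega)
        (by rw [show A0 - w0 + w0 = A0 by ring])
      rw [this, show A0 - w0 + w0 = A0 by ring]
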